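-- pv_equiv track=rewrite | github.com/Vladplxn/yandex_algorithms_trainings_3 | 09_sum_in_rectangle.py | func
-- ===== SOURCE A (Python) =====
-- def func(shapes, matr, borders):
--     results = []
--
--     prefix_sum = [[0] * (shapes[1] + 1) for _ in range(shapes[0] + 1)]
--     for i in range(1, shapes[0] + 1):
--         for j in range(1, shapes[1] + 1):
--             prefix_sum[i][j] = (
--                 matr[i - 1][j - 1]
--                 + prefix_sum[i - 1][j]
--                 + prefix_sum[i][j - 1]
--                 - prefix_sum[i - 1][j - 1]
--             )
--
--     for x_min, y_min, x_max, y_max in borders: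
--         results.append(
--             prefix_sum[x_max][y_max]
--             - prefix_sum[x_max][y_min - 1]
--             - prefix_sum[x_min - 1][y_max]
--             + prefix_sum[x_min - 1][y_min - 1]
--         )
--
--     return results
-- ===== SOURCE B (Python) =====
-- def func(shapes, matr, borders):
--     # Per-row 1D prefix sums instead of a full 2D integral image; each query
--     # builds the 1D prefix of its column-segment sums and takes one difference.
--     n, m = shapes[0], shapes[1]
--     rp = []
--     for i in range(n):
--         acc = [0]
--         for j in range(m):
--             acc.append(acc[-1] + matr[i][j])
--         rp.append(acc)
--     results = []
--     for x_min, y_min, x_max, y_max in borders: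
--         gp = [0]
--         for row in rp:
--             gp.append(gp[-1] + row[y_max] - row[y_min - 1])
--         results.append(gp[x_max] - gp[x_min - 1])
--     return results
-- ===== Notes on version B (the rewrite author's own statement) =====
-- stated objective: alternative
-- what changed: Replaces the 2D integral-image table with per-row 1D prefix sums; each query builds the 1D prefix of its column-segment sums and answers with a single difference.
import Mathlib
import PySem

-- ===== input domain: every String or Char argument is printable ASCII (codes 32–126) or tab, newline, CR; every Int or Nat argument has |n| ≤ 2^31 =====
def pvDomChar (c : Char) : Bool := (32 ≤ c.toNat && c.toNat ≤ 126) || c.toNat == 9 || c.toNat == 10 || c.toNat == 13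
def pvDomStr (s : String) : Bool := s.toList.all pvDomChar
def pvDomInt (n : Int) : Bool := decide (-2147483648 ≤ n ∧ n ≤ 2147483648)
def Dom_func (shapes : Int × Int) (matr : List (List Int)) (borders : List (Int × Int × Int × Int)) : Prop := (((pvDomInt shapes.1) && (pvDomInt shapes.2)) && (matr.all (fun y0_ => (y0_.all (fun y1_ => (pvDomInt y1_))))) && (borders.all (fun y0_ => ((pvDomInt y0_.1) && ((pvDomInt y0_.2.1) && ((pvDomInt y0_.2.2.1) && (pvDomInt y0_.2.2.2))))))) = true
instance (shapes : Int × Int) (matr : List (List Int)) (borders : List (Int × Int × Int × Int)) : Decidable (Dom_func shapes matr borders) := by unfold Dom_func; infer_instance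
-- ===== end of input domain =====

-- B replaces A's 2D integral-image table by per-row 1D prefix sums; each query
-- builds the 1D prefix of its column-segment sums and answers with one difference
-- (alternative decomposition, not claimed faster).


-- ===== PORT A =====
def func (shapes : Int × Int) (matr : List (List Int)) (borders : List (Int × Int × Int × Int)) : List Int :=
  -- prefix_sum = [[0] * (shapes[1] + 1) for _ in range(shapes[0] + 1)]
  let table0 : List (List Int) :=
    (PySem.List.pyRange 0 (shapes.1 + 1) 1).map (fun _ => PySem.List.pyRepeat [(0 : Int)] (shapes.2 + 1))
  -- the double loop filling prefix_sum (indices in range under Pre_, so the total pyGetD/pySetD forms)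
  let table : List (List Int) :=
    (PySem.List.pyRange 1 (shapes.1 + 1) 1).foldl (fun tb i =>
      (PySem.List.pyRange 1 (shapes.2 + 1) 1).foldl (fun tb j =>
        PySem.List.pySetD tb i (PySem.List.pySetD (PySem.List.pyGetD tb i []) j
          (PySem.List.pyGetD (PySem.List.pyGetD matr (i - 1) []) (j - 1) 0
           + PySem.List.pyGetD (PySem.List.pyGetD tb (i - 1) []) j 0
           + PySem.List.pyGetD (PySem.List.pyGetD tb i []) (j - 1) 0
           - PySem.List.pyGetD (PySem.List.pyGetD tb (i - 1) []) (j - 1) 0))) tb) table0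
  -- the query loop
  borders.foldl (fun res q =>
    res ++ [PySem.List.pyGetD (PySem.List.pyGetD table q.2.2.1 []) q.2.2.2 0
            - PySem.List.pyGetD (PySem.List.pyGetD table q.2.2.1 []) (q.2.1 - 1) 0
            - PySem.List.pyGetD (PySem.List.pyGetD table (q.1 - 1) []) q.2.2.2 0
            + PySem.List.pyGetD (PySem.List.pyGetD table (q.1 - 1) []) (q.2.1 - 1) 0]) []

-- ===== PORT B =====
def func_alt (shapes : Int × Int) (matr : List (List Int)) (borders : List (Int × Int × Int × Int)) : List Int :=
  -- rp: per-row 1D prefix sums (acc.append(acc[-1] + matr[i][j]))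
  let rp : List (List Int) :=
    (PySem.List.pyRange 0 shapes.1 1).foldl (fun rp i =>
      rp ++ [(PySem.List.pyRange 0 shapes.2 1).foldl (fun acc j =>
        acc ++ [PySem.List.pyGetD acc (-1) 0
                + PySem.List.pyGetD (PySem.List.pyGetD matr i []) j 0]) [(0 : Int)]]) []
  -- per query: gp = prefix of the column-segment sums, answer gp[x_max] - gp[x_min - 1]
  borders.foldl (fun res q =>
    let gp : List Int := rp.foldl (fun gp row =>
      gp ++ [PySem.List.pyGetD gp (-1) 0
             + PySem.List.pyGetD row q.2.2.2 0
             - PySem.List.pyGetD row (q.2.1 - 1) 0]) [(0 : Int)]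
    res ++ [PySem.List.pyGetD gp q.2.2.1 0 - PySem.List.pyGetD gp (q.1 - 1) 0]) []

-- ===== PRECONDITION & SPEC =====
-- Pre_func = exactly the inputs where Python A returns: the matrix covers the declared
-- shape whenever the filling loops run, and every query's four indices fall in Python's
-- (negative-wrapping) index range of the (shapes[0]+1) × (shapes[1]+1) prefix table.
def Pre_func (shapes : Int × Int) (matr : List (List Int)) (borders : List (Int × Int × Int × Int)) : Prop :=
  (1 ≤ shapes.1 → 1 ≤ shapes.2 →
     shapes.1 ≤ matr.length ∧ ∀ row ∈ matr.take shapes.1.toNat, shapes.2 ≤ row.length)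
  ∧ ∀ q ∈ borders,
      PySem.Raise.InRange (shapes.1 + 1).toNat (q.1 - 1) ∧
      PySem.Raise.InRange (shapes.1 + 1).toNat q.2.2.1 ∧
      PySem.Raise.InRange (shapes.2 + 1).toNat (q.2.1 - 1) ∧
      PySem.Raise.InRange (shapes.2 + 1).toNat q.2.2.2
instance (shapes : Int × Int) (matr : List (List Int)) (borders : List (Int × Int × Int × Int)) : Decidable (Pre_func shapes matr borders) := by unfold Pre_func; infer_instance

def pvWitness_func : (Int × Int) × List (List Int) × (List (Int × Int × Int × Int)) :=
  ((2, 2), [[1, 2], [3, 4]], [(1, 1, 2, 2), (1, 2, 1, 2)])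

def Spec_func (shapes : Int × Int) (matr : List (List Int)) (borders : List (Int × Int × Int × Int)) (out : List Int) : Prop := out = func_alt shapes matr borders
instance (shapes : Int × Int) (matr : List (List Int)) (borders : List (Int × Int × Int × Int)) (out : List Int) : Decidable (Spec_func shapes matr borders out) := by unfold Spec_func; infer_instance

-- ===== CLAIM (what is proved, stated in full; the proofs are below) =====
def Claim_equal_func : Prop := ∀ (shapes : Int × Int) (matr : List (List Int)) (borders : List (Int × Int × Int × Int)), Dom_func shapes matr borders → Pre_func shapes matr borders → Spec_func shapes matr borders (func shapes matr borders)

-- ===== LEMMAS AND PROOFS =====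

-- the matrix entry matr[i][j] as both ports read it (total getD form, Nat indices)
def el (matr : List (List Int)) (i j : Nat) : Int := (matr.getD i []).getD j 0

-- R matr i b = sum of the first b entries of row i; S matr a b = top-left a × b rectangle sum
def R (matr : List (List Int)) (i b : Nat) : Int := ((List.range b).map (el matr i)).sum
def S (matr : List (List Int)) (a b : Nat) : Int := ((List.range a).map (fun i => R matr i b)).sum

-- Python's index normalisation for a list of length L
def wrap (L : Nat) (i : Int) : Nat := if i < 0 then (i + L).toNat else i.toNat

lemma wrap_lt (L : Nat) (i : Int) (h : PySem.Raise.InRange L i) : wrap L i < L := by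
  obtain ⟨h1, h2⟩ := h; unfold wrap; split_ifs <;> omega

lemma pyGetD_wrap {α : Type} (xs : List α) (i : Int) (d : α)
    (h : PySem.Raise.InRange xs.length i) :
    PySem.List.pyGetD xs i d = xs.getD (wrap xs.length i) d := by
  obtain ⟨h1, h2⟩ := h
  by_cases hpos : 0 ≤ i
  · rw [PySem.List.pyGetD_eq_getElem xs d hpos h2, wrap, if_neg (by omega),
        List.getD_eq_getElem?_getD, List.getElem?_eq_getElem (by omega), Option.getD_some]
  · obtain ⟨k, hk⟩ : ∃ k : Nat, i = -(k : Int) := ⟨(-i).toNat, by omega⟩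
    subst hk
    rw [PySem.List.pyGetD_neg_natCast xs k d (by omega) (by omega), wrap, if_pos (by omega),
        List.getD_eq_getElem?_getD, List.getElem?_eq_getElem (by omega), Option.getD_some]
    congr 1
    omega

-- the running-append loop `acc.append(acc[-1] + f(x))`
def accRun {α : Type} (f : α → Int) : Int → List α → List Int
  | _, [] => []
  | s, x :: xs => (s + f x) :: accRun f (s + f x) xs

lemma length_accRun {α : Type} (f : α → Int) (s : Int) (l : List α) :
    (accRun f s l).length = l.length := by
  induction l generalizing s with
  | nil => rfl
  | cons x xs ih => simp [accRun, ih]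

lemma foldl_accRun {α : Type} (f : α → Int) (l : List α) (init : List Int) (h : init ≠ []) :
    l.foldl (fun acc x => acc ++ [PySem.List.pyGetD acc (-1) 0 + f x]) init
      = init ++ accRun f (init.getLast h) l := by
  induction l generalizing init with
  | nil => simp [accRun]
  | cons x xs ih =>
      simp only [List.foldl_cons, accRun]
      rw [PySem.List.pyGetD_neg_one init 0 h,
          ih (init ++ [init.getLast h + f x]) (by simp)]
      simp

lemma accRun_map {α β : Type} (g : α → β) (f : β → Int) (s : Int) (l : List α) :
    accRun f s (l.map g) = accRun (fun x => f (g x)) s l := by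
  induction l generalizing s with
  | nil => rfl
  | cons x xs ih => simp [accRun, ih]

lemma getD_cons_accRun {α : Type} (f : α → Int) (s : Int) (l : List α) (k : Nat)
    (hk : k ≤ l.length) :
    (s :: accRun f s l).getD k 0 = s + ((l.take k).map f).sum := by
  induction l generalizing s k with
  | nil =>
      have : k = 0 := by simpa using hk
      subst this; simp
  | cons x xs ih =>
      cases k with
      | zero => simp
      | succ k =>
          have := ih (s + f x) k (by simpa using hk)
          simpa [accRun, add_assoc] using this

-- updating one row of a map-over-range table
lemma set_map_range {β : Type} (f : Nat → β) (N i : Nat) (v : β) (hi : i < N) :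
    ((List.range N).map f).set i v
      = (List.range N).map (fun r => if r = i then v else f r) := by
  apply List.ext_getElem (by simp)
  intro k h1 h2
  simp only [List.getElem_set, List.getElem_map, List.getElem_range]
  by_cases hk : i = k
  · simp [hk]
  · rw [if_neg hk, if_neg (show ¬ k = i from fun h => hk h.symm)]

-- the A-side table states are all of this shape
def tbl (n' m' : Nat) (g : Nat → Nat → Int) : List (List Int) :=
  (List.range (n' + 1)).map (fun r => (List.range (m' + 1)).map (g r))

lemma tbl_get (n' m' : Nat) (g : Nat → Nat → Int) (r c : Nat)
    (hr : r < n' + 1) (hc : c < m' + 1) :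
    PySem.List.pyGetD (PySem.List.pyGetD (tbl n' m' g) (r : Int) []) (c : Int) 0 = g r c := by
  rw [PySem.List.pyGetD_natCast, PySem.List.pyGetD_natCast, tbl,
      PySem.List.getD_map_range _ _ _ _ hr, PySem.List.getD_map_range _ _ _ _ hc]

lemma tbl_set (n' m' : Nat) (g : Nat → Nat → Int) (r c : Nat) (v : Int)
    (hr : r < n' + 1) (hc : c < m' + 1) :
    PySem.List.pySetD (tbl n' m' g) (r : Int)
        (PySem.List.pySetD (PySem.List.pyGetD (tbl n' m' g) (r : Int) []) (c : Int) v)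
      = tbl n' m' (fun r' c' => if r' = r ∧ c' = c then v else g r' c') := by
  rw [PySem.List.pyGetD_natCast, PySem.List.pySetD_of_nonneg _ _ (by positivity),
      PySem.List.pySetD_of_nonneg _ _ (by positivity)]
  simp only [Int.toNat_natCast, tbl, PySem.List.getD_map_range _ _ _ _ hr,
      set_map_range _ _ _ _ hc, set_map_range _ _ _ _ hr]
  apply List.map_congr_left
  intro r' hr'
  by_cases h : r' = r
  · subst h
    simp only [if_pos rfl]
    apply List.map_congr_left
    intro c' _
    by_cases hcc : c' = c <;> simp [hcc]
  · simp only [if_neg h]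
    apply List.map_congr_left
    intro c' _
    simp [h]

lemma tbl_congr (n' m' : Nat) (g g' : Nat → Nat → Int)
    (h : ∀ r < n' + 1, ∀ c < m' + 1, g r c = g' r c) : tbl n' m' g = tbl n' m' g' := by
  unfold tbl
  apply List.map_congr_left
  intro r hr
  apply List.map_congr_left
  intro c hc
  exact h r (by simpa using hr) c (by simpa using hc)

lemma length_tbl (n' m' : Nat) (g : Nat → Nat → Int) : (tbl n' m' g).length = n' + 1 := by
  simp [tbl]

-- reading a tbl with Python's wrapping indices
lemma tbl_get_wrap (n' m' : Nat) (g : Nat → Nat → Int) (a b : Int)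
    (ha : PySem.Raise.InRange (n' + 1) a) (hb : PySem.Raise.InRange (m' + 1) b) :
    PySem.List.pyGetD (PySem.List.pyGetD (tbl n' m' g) a []) b 0
      = g (wrap (n' + 1) a) (wrap (m' + 1) b) := by
  have h1 : PySem.Raise.InRange (tbl n' m' g).length a := by rwa [length_tbl]
  rw [pyGetD_wrap _ a [] h1, length_tbl, tbl,
      PySem.List.getD_map_range _ _ _ _ (wrap_lt _ _ ha)]
  have hlen : ((List.range (m' + 1)).map (g (wrap (n' + 1) a))).length = m' + 1 := by simp
  have h2 : PySem.Raise.InRange ((List.range (m' + 1)).map (g (wrap (n' + 1) a))).length b := by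
    rwa [hlen]
  rw [pyGetD_wrap _ b 0 h2, hlen, PySem.List.getD_map_range _ _ _ _ (wrap_lt _ _ hb)]

-- basic facts about R and S
lemma R_succ (matr : List (List Int)) (i b : Nat) :
    R matr i (b + 1) = R matr i b + el matr i b := by
  simp [R, List.range_succ]

lemma S_succ (matr : List (List Int)) (a b : Nat) :
    S matr (a + 1) b = S matr a b + R matr a b := by
  simp [S, List.range_succ]

lemma R_zero (matr : List (List Int)) (i : Nat) : R matr i 0 = 0 := by simp [R]

lemma S_zero (matr : List (List Int)) (b : Nat) : S matr 0 b = 0 := by simp [S]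

lemma S_zero_right (matr : List (List Int)) (a : Nat) : S matr a 0 = 0 := by
  induction a with
  | zero => simp [S]
  | succ a ih => rw [S_succ, ih, R_zero]; ring

lemma S_rec (matr : List (List Int)) (k j : Nat) :
    S matr (k + 1) (j + 1)
      = el matr k j + S matr k (j + 1) + S matr (k + 1) j - S matr k j := by
  rw [S_succ, S_succ, R_succ]
  ring

-- A's inner loop: filling row k+1 of the table up to column j
lemma innerA (matr : List (List Int)) (n' m' k : Nat) (hk : k < n') :
    ∀ j, j ≤ m' →
    (PySem.List.pyRange 1 ((j : Int) + 1) 1).foldl (fun tb jj =>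
        PySem.List.pySetD tb ((k : Int) + 1) (PySem.List.pySetD (PySem.List.pyGetD tb ((k : Int) + 1) []) jj
          (PySem.List.pyGetD (PySem.List.pyGetD matr (((k : Int) + 1) - 1) []) (jj - 1) 0
           + PySem.List.pyGetD (PySem.List.pyGetD tb (((k : Int) + 1) - 1) []) jj 0
           + PySem.List.pyGetD (PySem.List.pyGetD tb ((k : Int) + 1) []) (jj - 1) 0
           - PySem.List.pyGetD (PySem.List.pyGetD tb (((k : Int) + 1) - 1) []) (jj - 1) 0)))
      (tbl n' m' (fun r c => if r ≤ k then S matr r c else 0))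
    = tbl n' m' (fun r c => if r ≤ k then S matr r c
        else if r = k + 1 ∧ c ≤ j then S matr r c else 0) := by
  intro j
  induction j with
  | zero =>
      intro _
      rw [show ((0 : Nat) : Int) + 1 = 1 by norm_num,
          PySem.List.pyRange_one_eq_nil (a := 1) (b := 1) (le_refl 1)]
      simp only [List.foldl_nil]
      apply tbl_congr
      intro r _ c _
      by_cases h : r ≤ k
      · simp [h]
      · simp only [if_neg h]
        by_cases hr : r = k + 1 ∧ c ≤ 0
        · simp [hr, show c = 0 from Nat.le_zero.mp hr.2, S_zero_right]
        · rw [if_neg hr]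
  | succ j ih =>
      intro hj
      have hj' : j ≤ m' := by omega
      rw [show ((j + 1 : Nat) : Int) + 1 = ((j : Int) + 1) + 1 by push_cast; ring,
          PySem.List.pyRange_one_succ_right (a := 1) (b := (j : Int) + 1) (by omega),
          List.foldl_append, ih hj']
      simp only [List.foldl_cons, List.foldl_nil]
      -- normalise the four reads and the write on the tbl form
      have e1 : ((k : Int) + 1) - 1 = ((k : Nat) : Int) := by ring
      have e2 : ((j : Int) + 1) - 1 = ((j : Nat) : Int) := by ring
      have e3 : (k : Int) + 1 = (((k + 1 : Nat)) : Int) := by push_cast; ring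
      have e4 : (j : Int) + 1 = (((j + 1 : Nat)) : Int) := by push_cast; ring
      rw [e1, e2, e3, e4]
      rw [PySem.List.pyGetD_natCast matr, PySem.List.pyGetD_natCast _ j 0]
      rw [tbl_get _ _ _ k (j + 1) (by omega) (by omega),
          tbl_get _ _ _ (k + 1) j (by omega) (by omega),
          tbl_get _ _ _ k j (by omega) (by omega),
          tbl_set _ _ _ (k + 1) (j + 1) _ (by omega) (by omega)]
      apply tbl_congr
      intro r _ c _
      by_cases hrc : r = k + 1 ∧ c = j + 1
      · obtain ⟨hr1, hc1⟩ := hrc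
        subst hr1; subst hc1
        have t1 : ¬ (k + 1 ≤ k) := by omega
        simp [t1, S_rec, el]
      · simp only [if_neg hrc]
        by_cases h : r ≤ k
        · simp [h]
        · simp only [if_neg h]
          by_cases hr1 : r = k + 1 ∧ c ≤ j + 1
          · have hcne : c ≠ j + 1 := fun hcc => hrc ⟨hr1.1, hcc⟩
            have h2 : r = k + 1 ∧ c ≤ j := ⟨hr1.1, by omega⟩
            simp [hr1, h2]
          · have h2 : ¬ (r = k + 1 ∧ c ≤ j) := fun hc => hr1 ⟨hc.1, by omega⟩
            simp [hr1, h2]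

-- A's outer loop
lemma outerA (matr : List (List Int)) (n' m' : Nat) :
    ∀ k, k ≤ n' →
    (PySem.List.pyRange 1 ((k : Int) + 1) 1).foldl (fun tb i =>
      (PySem.List.pyRange 1 (((m' : Nat) : Int) + 1) 1).foldl (fun tb j =>
        PySem.List.pySetD tb i (PySem.List.pySetD (PySem.List.pyGetD tb i []) j
          (PySem.List.pyGetD (PySem.List.pyGetD matr (i - 1) []) (j - 1) 0
           + PySem.List.pyGetD (PySem.List.pyGetD tb (i - 1) []) j 0
           + PySem.List.pyGetD (PySem.List.pyGetD tb i []) (j - 1) 0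
           - PySem.List.pyGetD (PySem.List.pyGetD tb (i - 1) []) (j - 1) 0))) tb)
      (tbl n' m' (fun _ _ => 0))
    = tbl n' m' (fun r c => if r ≤ k then S matr r c else 0) := by
  intro k
  induction k with
  | zero =>
      intro _
      rw [show ((0 : Nat) : Int) + 1 = 1 by norm_num,
          PySem.List.pyRange_one_eq_nil (a := 1) (b := 1) (le_refl 1)]
      simp only [List.foldl_nil]
      apply tbl_congr
      intro r _ c _
      rcases Nat.eq_zero_or_pos r with h | h
      · simp [h, S_zero]
      · simp [show ¬ r ≤ 0 by omega]
  | succ k ih =>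
      intro hk
      have hk' : k ≤ n' := by omega
      rw [show ((k + 1 : Nat) : Int) + 1 = ((k : Int) + 1) + 1 by push_cast; ring,
          PySem.List.pyRange_one_succ_right (a := 1) (b := (k : Int) + 1) (by omega),
          List.foldl_append, ih hk']
      simp only [List.foldl_cons, List.foldl_nil]
      rw [innerA matr n' m' k (by omega) m' le_rfl]
      apply tbl_congr
      intro r _ c hc
      by_cases h : r ≤ k
      · simp [h, show r ≤ k + 1 by omega]
      · by_cases h1 : r = k + 1
        · simp [h1, show c ≤ m' by omega]
        · simp [show ¬ r ≤ k by omega, show ¬ r ≤ k + 1 by omega, h1]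

-- B-side closed forms
def rowB (matr : List (List Int)) (i' m' : Nat) : List Int :=
  (0 : Int) :: accRun (fun j : Nat => PySem.List.pyGetD (PySem.List.pyGetD matr ((i' : Nat) : Int) []) ((j : Nat) : Int) 0) 0
    (List.range m')

def gpB (matr : List (List Int)) (n' m' : Nat) (q : Int × Int × Int × Int) : List Int :=
  (0 : Int) :: accRun (fun row => PySem.List.pyGetD row q.2.2.2 0 - PySem.List.pyGetD row (q.2.1 - 1) 0) 0
    ((List.range n').map (fun i => rowB matr i m'))

lemma take_map_range {β : Type} (f : Nat → β) (n k : Nat) (hk : k ≤ n) :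
    ((List.range n).map f).take k = (List.range k).map f := by
  apply List.ext_getElem (by simp; omega)
  intro i h1 h2
  simp only [List.getElem_take, List.getElem_map, List.getElem_range]

lemma sum_map_sub {α : Type} (l : List α) (f g : α → Int) :
    (l.map (fun x => f x - g x)).sum = (l.map f).sum - (l.map g).sum := by
  induction l with
  | nil => simp
  | cons x xs ih => simp [ih]; ring

lemma rowB_length (matr : List (List Int)) (i' m' : Nat) : (rowB matr i' m').length = m' + 1 := by
  simp [rowB, length_accRun]

lemma rowB_getD (matr : List (List Int)) (i' m' c : Nat) (hc : c ≤ m') :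
    (rowB matr i' m').getD c 0 = R matr i' c := by
  rw [rowB, getD_cons_accRun _ _ _ c (by simpa using hc), List.take_range, min_eq_left hc,
      zero_add, R]
  apply congrArg
  apply List.map_congr_left
  intro j _
  simp [el, PySem.List.pyGetD_natCast]

lemma rowB_pyGetD (matr : List (List Int)) (i' m' : Nat) (b : Int)
    (hb : PySem.Raise.InRange (m' + 1) b) :
    PySem.List.pyGetD (rowB matr i' m') b 0 = R matr i' (wrap (m' + 1) b) := by
  have hl : (rowB matr i' m').length = m' + 1 := rowB_length matr i' m'
  rw [pyGetD_wrap _ b 0 (by rw [hl]; exact hb), hl,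
      rowB_getD _ _ _ _ (by have := wrap_lt _ _ hb; omega)]

lemma length_gpB (matr : List (List Int)) (n' m' : Nat) (q : Int × Int × Int × Int) :
    (gpB matr n' m' q).length = n' + 1 := by
  simp [gpB, length_accRun]

lemma gpB_getD (matr : List (List Int)) (n' m' : Nat) (q : Int × Int × Int × Int)
    (h3 : PySem.Raise.InRange (m' + 1) (q.2.1 - 1)) (h4 : PySem.Raise.InRange (m' + 1) q.2.2.2)
    (k : Nat) (hk : k ≤ n') :
    (gpB matr n' m' q).getD k 0
      = S matr k (wrap (m' + 1) q.2.2.2) - S matr k (wrap (m' + 1) (q.2.1 - 1)) := by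
  rw [gpB, getD_cons_accRun _ _ _ k (by simpa using hk), take_map_range _ _ _ hk,
      List.map_map, zero_add]
  have : (List.range k).map ((fun row => PySem.List.pyGetD row q.2.2.2 0 - PySem.List.pyGetD row (q.2.1 - 1) 0) ∘ (fun i => rowB matr i m'))
      = (List.range k).map (fun i => R matr i (wrap (m' + 1) q.2.2.2) - R matr i (wrap (m' + 1) (q.2.1 - 1))) := by
    apply List.map_congr_left
    intro i _
    simp only [Function.comp]
    rw [rowB_pyGetD _ _ _ _ h4, rowB_pyGetD _ _ _ _ h3]
  rw [this, sum_map_sub]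
  rfl

-- the evaluated forms of the two ports (shapes already known nonnegative)
lemma table0_eq (n' m' : Nat) :
    (PySem.List.pyRange 0 (((n' : Nat) : Int) + 1) 1).map (fun _ => PySem.List.pyRepeat [(0 : Int)] (((m' : Nat) : Int) + 1))
      = tbl n' m' (fun _ _ => 0) := by
  rw [show ((n' : Int) + 1) = (((n' + 1 : Nat)) : Int) by push_cast; ring,
      PySem.List.pyRange_zero_natCast, List.map_map]
  unfold tbl
  apply List.map_congr_left
  intro r _
  simp only [Function.comp, PySem.List.pyRepeat_singleton]
  rw [show (((m' : Int) + 1)).toNat = m' + 1 by omega]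
  apply List.ext_getElem (by simp)
  intro i h1 h2
  simp

lemma funcA_eval (n' m' : Nat) (matr : List (List Int)) (borders : List (Int × Int × Int × Int)) :
    func (((n' : Nat) : Int), ((m' : Nat) : Int)) matr borders
      = borders.map (fun q =>
          PySem.List.pyGetD (PySem.List.pyGetD (tbl n' m' (S matr)) q.2.2.1 []) q.2.2.2 0
          - PySem.List.pyGetD (PySem.List.pyGetD (tbl n' m' (S matr)) q.2.2.1 []) (q.2.1 - 1) 0
          - PySem.List.pyGetD (PySem.List.pyGetD (tbl n' m' (S matr)) (q.1 - 1) []) q.2.2.2 0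
          + PySem.List.pyGetD (PySem.List.pyGetD (tbl n' m' (S matr)) (q.1 - 1) []) (q.2.1 - 1) 0) := by
  simp only [func]
  rw [table0_eq n' m', outerA matr n' m' n' le_rfl,
      tbl_congr _ _ _ (S matr) (fun r hr c hc => by rw [if_pos (by omega : r ≤ n')]),
      PySem.List.foldl_append_singleton_eq_map, List.nil_append]

lemma rpB_eq (matr : List (List Int)) (n' m' : Nat) :
    List.foldl (fun rp i =>
      rp ++ [List.foldl (fun acc j =>
        acc ++ [PySem.List.pyGetD acc (-1) 0
                + PySem.List.pyGetD (PySem.List.pyGetD matr i []) j 0]) [(0 : Int)]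
          (PySem.List.pyRange 0 ((m' : Nat) : Int) 1)]) []
      (PySem.List.pyRange 0 ((n' : Nat) : Int) 1)
    = (List.range n').map (fun i => rowB matr i m') := by
  rw [PySem.List.foldl_append_singleton_eq_map, List.nil_append,
      PySem.List.pyRange_zero_natCast m', PySem.List.pyRange_zero_natCast n', List.map_map]
  apply List.map_congr_left
  intro i _
  simp only [Function.comp]
  rw [foldl_accRun _ _ [(0 : Int)] (by simp), accRun_map]
  rfl

lemma funcB_eval (n' m' : Nat) (matr : List (List Int)) (borders : List (Int × Int × Int × Int)) :
    func_alt (((n' : Nat) : Int), ((m' : Nat) : Int)) matr borders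
      = borders.map (fun q =>
          PySem.List.pyGetD (gpB matr n' m' q) q.2.2.1 0
          - PySem.List.pyGetD (gpB matr n' m' q) (q.1 - 1) 0) := by
  simp only [func_alt]
  rw [rpB_eq matr n' m', PySem.List.foldl_append_singleton_eq_map, List.nil_append]
  apply List.map_congr_left
  intro q _
  have hgp : List.foldl (fun gp row =>
      gp ++ [PySem.List.pyGetD gp (-1) 0
             + PySem.List.pyGetD row q.2.2.2 0
             - PySem.List.pyGetD row (q.2.1 - 1) 0]) [(0 : Int)]
      ((List.range n').map (fun i => rowB matr i m')) = gpB matr n' m' q := by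
    rw [PySem.List.foldl_congr_mem _ _ (fun gp row =>
        gp ++ [PySem.List.pyGetD gp (-1) 0
               + (PySem.List.pyGetD row q.2.2.2 0 - PySem.List.pyGetD row (q.2.1 - 1) 0)]) _
        (fun acc x _ => by rw [add_sub_assoc])]
    rw [foldl_accRun _ _ [(0 : Int)] (by simp)]
    simp [gpB]
  rw [hgp]

-- the per-query agreement
lemma query_eq (matr : List (List Int)) (n' m' : Nat) (q : Int × Int × Int × Int)
    (h1 : PySem.Raise.InRange (n' + 1) (q.1 - 1)) (h2 : PySem.Raise.InRange (n' + 1) q.2.2.1)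
    (h3 : PySem.Raise.InRange (m' + 1) (q.2.1 - 1)) (h4 : PySem.Raise.InRange (m' + 1) q.2.2.2) :
    PySem.List.pyGetD (PySem.List.pyGetD (tbl n' m' (S matr)) q.2.2.1 []) q.2.2.2 0
    - PySem.List.pyGetD (PySem.List.pyGetD (tbl n' m' (S matr)) q.2.2.1 []) (q.2.1 - 1) 0
    - PySem.List.pyGetD (PySem.List.pyGetD (tbl n' m' (S matr)) (q.1 - 1) []) q.2.2.2 0
    + PySem.List.pyGetD (PySem.List.pyGetD (tbl n' m' (S matr)) (q.1 - 1) []) (q.2.1 - 1) 0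
    = PySem.List.pyGetD (gpB matr n' m' q) q.2.2.1 0
      - PySem.List.pyGetD (gpB matr n' m' q) (q.1 - 1) 0 := by
  rw [tbl_get_wrap _ _ _ _ _ h2 h4, tbl_get_wrap _ _ _ _ _ h2 h3,
      tbl_get_wrap _ _ _ _ _ h1 h4, tbl_get_wrap _ _ _ _ _ h1 h3]
  have hlg : (gpB matr n' m' q).length = n' + 1 := length_gpB matr n' m' q
  rw [pyGetD_wrap _ q.2.2.1 0 (by rw [hlg]; exact h2),
      pyGetD_wrap _ (q.1 - 1) 0 (by rw [hlg]; exact h1), hlg,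
      gpB_getD _ _ _ _ h3 h4 _ (by have := wrap_lt _ _ h2; omega),
      gpB_getD _ _ _ _ h3 h4 _ (by have := wrap_lt _ _ h1; omega)]
  ring

-- ===== VERDICT (by name: the statement is the Claim_ definition above) =====
theorem func_spec : Claim_equal_func := by
  intro shapes matr borders _ hpre
  obtain ⟨a, b⟩ := shapes
  obtain ⟨hmat, hq⟩ := hpre
  unfold Spec_func
  match borders with
  | [] => simp [func, func_alt]
  | q0 :: qs =>
    have h0 := hq q0 (by simp)
    have ha : 0 ≤ a := by
      obtain ⟨l, r⟩ := h0.2.1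
      simp only at l r
      omega
    have hb : 0 ≤ b := by
      obtain ⟨l, r⟩ := h0.2.2.2
      simp only at l r
      omega
    obtain ⟨n', rfl⟩ : ∃ k : Nat, a = (k : Int) := ⟨a.toNat, by omega⟩
    obtain ⟨m', rfl⟩ : ∃ k : Nat, b = (k : Int) := ⟨b.toNat, by omega⟩
    have en : (((n' : Int)) + 1).toNat = n' + 1 := by omega
    have em : (((m' : Int)) + 1).toNat = m' + 1 := by omega
    rw [funcA_eval, funcB_eval]
    apply List.map_congr_left
    intro q hqm
    have hql := hq q hqm
    simp only [en, em] at hql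
    exact query_eq matr n' m' q hql.1 hql.2.1 hql.2.2.1 hql.2.2.2
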